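-- pv_equiv track=rewrite | github.com/hippie-cycling/CBFT | scripts/Gromark_transposition.py | validate_keyword
-- ===== SOURCE A (Python) =====
-- from typing import List, Tuple, Dict
--
-- def create_keyed_alphabet(keyword: str, alphabet: str = "ABCDEFGHIJKLMNOPQRSTUVWXYZ") -> str:
--     keyword = ''.join(dict.fromkeys(keyword.upper()))
--     remaining = ''.join(c for c in alphabet if c not in keyword)
--     base = keyword + remaining
--     cols = len(keyword)
--     if cols == 0: return alphabet
--     rows = (len(base) + cols - 1) // cols
--     block = [['' for _ in range(cols)] for _ in range(rows)]
--     idx = 0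
--     for i in range(rows):
--         for j in range(cols):
--             if idx < len(base):
--                 block[i][j] = base[idx]
--                 idx += 1
--
--     sorted_keyword_with_indices = sorted([(char, i) for i, char in enumerate(keyword)])
--     final_col_order = [i for char, i in sorted_keyword_with_indices]
--
--     return ''.join(
--         block[row][col]
--         for col in final_col_order
--         for row in range(rows)
--         if row < len(block) and col < len(block[row]) and block[row][col]
--     )
--
-- def validate_keyword(keyword: str, known_segments: List[Tuple], alphabet: str = "ABCDEFGHIJKLMNOPQRSTUVWXYZ") -> bool:
--     try:
--         mixed_alphabet = create_keyed_alphabet(keyword, alphabet)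
--         for _, cipher_segment, plain_segment in known_segments:
--             for c, p in zip(cipher_segment, plain_segment):
--                 mixed_pos = mixed_alphabet.find(c)
--                 if mixed_pos == -1: return False
--                 straight_letter = alphabet[mixed_pos]
--                 plain_pos = alphabet.find(p.upper())
--                 straight_pos = alphabet.find(straight_letter)
--                 if (straight_pos - plain_pos) % len(alphabet) > 9:
--                     return False
--         return True
--     except Exception:
--         return False
-- ===== SOURCE B (Python) =====
-- from typing import List, Tuple
--
-- def create_keyed_alphabet(keyword: str, alphabet: str = "ABCDEFGHIJKLMNOPQRSTUVWXYZ") -> str: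
--     keyword = ''.join(dict.fromkeys(keyword.upper()))
--     remaining = ''.join(c for c in alphabet if c not in keyword)
--     base = keyword + remaining
--     cols = len(keyword)
--     if cols == 0:
--         return alphabet
--     final_col_order = [i for _, i in sorted((ch, i) for i, ch in enumerate(keyword))]
--     # each column of the row-major grid is exactly the stride-`cols` slice of `base`
--     return ''.join(base[col::cols] for col in final_col_order)
--
-- def validate_keyword(keyword: str, known_segments: List[Tuple], alphabet: str = "ABCDEFGHIJKLMNOPQRSTUVWXYZ") -> bool:
--     mixed_alphabet = create_keyed_alphabet(keyword, alphabet)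
--     n = len(alphabet)
--
--     def ok(c: str, p: str) -> bool:
--         mixed_pos = mixed_alphabet.find(c)
--         if mixed_pos == -1 or mixed_pos >= n:
--             return False
--         return (alphabet.find(alphabet[mixed_pos]) - alphabet.find(p.upper())) % n <= 9
--
--     return all(
--         ok(c, p)
--         for _, cipher_segment, plain_segment in known_segments
--         for c, p in zip(cipher_segment, plain_segment)
--     )
-- ===== Notes on version B (the rewrite author's own statement) =====
-- stated objective: simpler
-- what changed: create_keyed_alphabet drops the explicit rows×cols grid fill plus guarded cell-by-cell reader and instead concatenates the stride slices base[col::cols] per sorted column; validate_keyword replaces the try/except with early returns by a flat all(...) over the zipped pairs with an explicit bounds guard (mixed_pos >= len(alphabet)), which makes the IndexError path A relies on unnecessary.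
import Mathlib
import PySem

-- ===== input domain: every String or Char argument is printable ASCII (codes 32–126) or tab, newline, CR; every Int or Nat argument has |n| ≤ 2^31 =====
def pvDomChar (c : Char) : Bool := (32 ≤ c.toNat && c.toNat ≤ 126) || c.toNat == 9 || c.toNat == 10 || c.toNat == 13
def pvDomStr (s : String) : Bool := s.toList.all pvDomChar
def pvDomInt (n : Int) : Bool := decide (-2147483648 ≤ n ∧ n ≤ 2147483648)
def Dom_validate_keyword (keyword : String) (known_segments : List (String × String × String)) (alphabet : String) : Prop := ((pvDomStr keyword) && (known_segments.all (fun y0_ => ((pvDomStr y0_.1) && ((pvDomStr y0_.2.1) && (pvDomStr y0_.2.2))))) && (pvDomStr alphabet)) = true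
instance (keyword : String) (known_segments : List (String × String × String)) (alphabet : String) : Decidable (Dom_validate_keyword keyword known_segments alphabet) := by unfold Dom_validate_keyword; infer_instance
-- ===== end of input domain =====

-- B rewrites create_keyed_alphabet without the 2D grid (column stride-slices of `base`)
-- and validate_keyword as a flat `all(...)` with an explicit bounds guard instead of
-- try/except with early returns; objective: simpler.

-- ===== PORT A =====
-- lines shared verbatim by Source A and Source B (keyword dedup/uppercase, base, column order)
def gkKeyword (keyword : List Char) : List Char :=
  PySem.List.dedup (PySem.Chars.upper keyword)

def gkBase (kw alphabet : List Char) : List Char :=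
  kw ++ alphabet.filter (fun c => !(PySem.Chars.isIn [c] kw))

def gkOrder (kw : List Char) : List Int :=
  (PySem.List.sorted2 ((PySem.List.enumerate kw 0).map (fun p => (p.2, p.1)))
      (fun q => q.1) (fun q => q.2) false).map (fun q => q.2)

-- body of A's `for j in range(cols)` grid-fill loop; a cell '' is modelled as []
def gkFillCell (base : List Char) (i : Nat)
    (st : List (List (List Char)) × Nat) (j : Nat) : List (List (List Char)) × Nat :=
  if st.2 < base.length then
    (st.1.set i ((st.1.getD i []).set j [base.getD st.2 ' ']), st.2 + 1)
  else st

-- A's `for i in range(rows)` loop body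
def gkFillRow (base : List Char) (cols : Nat)
    (st : List (List (List Char)) × Nat) (i : Nat) : List (List (List Char)) × Nat :=
  (List.range cols).foldl (gkFillCell base i) st

def create_keyed_alphabet_py (keyword alphabet : List Char) : List Char :=
  let kw := gkKeyword keyword
  let base := gkBase kw alphabet
  let cols := kw.length
  if cols = 0 then alphabet else
  let rows := (base.length + cols - 1) / cols
  let block := ((List.range rows).foldl (gkFillRow base cols)
      (List.replicate rows (List.replicate cols []), 0)).1
  (gkOrder kw).flatMap (fun col =>
    (List.range rows).flatMap (fun row =>
      if row < block.length ∧ (col : Int) < ((block.getD row []).length : Int) ∧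
          PySem.List.pyGetD (block.getD row []) col [] ≠ [] then
        PySem.List.pyGetD (block.getD row []) col []
      else []))

-- A's inner `for c, p in zip(...)` loop: some none = fell through, some (some b) = `return b`,
-- none = exception inside the try (IndexError from alphabet[mixed_pos]) → A returns False
def vkInnerA (mixed alph : List Char) : List (Char × Char) → Option (Option Bool)
  | [] => some none
  | (c, p) :: rest =>
    let mixed_pos := PySem.Chars.find mixed [c]
    if mixed_pos = -1 then some (some false) else
    match PySem.List.pyGet? alph mixed_pos with
    | none => none
    | some straight_letter =>
      let plain_pos := PySem.Chars.find alph [PySem.Chars.upperChar p]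
      let straight_pos := PySem.Chars.find alph [straight_letter]
      -- `% len(alphabet)`: here alph ≠ [] (pyGet? succeeded), so Python's % cannot raise
      if PySem.Int.mod (straight_pos - plain_pos) (alph.length : Int) > 9 then some (some false)
      else vkInnerA mixed alph rest

-- A's outer `for _, cipher_segment, plain_segment in known_segments` loop
def vkOuterA (mixed alph : List Char) : List (String × String × String) → Option Bool
  | [] => some true
  | (_, cs, ps) :: rest =>
    match vkInnerA mixed alph (cs.toList.zip ps.toList) with
    | none => none
    | some (some b) => some b
    | some none => vkOuterA mixed alph rest

def validate_keyword (keyword : String) (known_segments : List (String × String × String)) (alphabet : String) : Bool :=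
  match vkOuterA (create_keyed_alphabet_py keyword.toList alphabet.toList) alphabet.toList known_segments with
  | none => false          -- `except Exception: return False`
  | some b => b

-- ===== PORT B =====
def create_keyed_alphabet_alt_py (keyword alphabet : List Char) : List Char :=
  let kw := gkKeyword keyword
  let base := gkBase kw alphabet
  let cols := kw.length
  if cols = 0 then alphabet else
  -- ''.join(base[col::cols] for col in final_col_order); step cols ≠ 0 here, so slice? is some
  (gkOrder kw).flatMap (fun col => (PySem.List.slice? base (some col) none (cols : Int)).getD [])

-- Source B's ok(c, p)
def vkOk (mixed alph : List Char) (n : Int) (c p : Char) : Bool :=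
  let mixed_pos := PySem.Chars.find mixed [c]
  if mixed_pos = -1 || n ≤ mixed_pos then false
  else
    PySem.Int.mod (PySem.Chars.find alph [PySem.List.pyGetD alph mixed_pos ' ']
      - PySem.Chars.find alph [PySem.Chars.upperChar p]) n ≤ 9

def validate_keyword_alt (keyword : String) (known_segments : List (String × String × String)) (alphabet : String) : Bool :=
  let mixed := create_keyed_alphabet_alt_py keyword.toList alphabet.toList
  let alph := alphabet.toList
  (known_segments.flatMap (fun t => t.2.1.toList.zip t.2.2.toList)).all
    (fun cp => vkOk mixed alph (alph.length : Int) cp.1 cp.2)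

-- ===== PRECONDITION & SPEC =====
def Spec_validate_keyword (keyword : String) (known_segments : List (String × String × String)) (alphabet : String) (out : Bool) : Prop := out = validate_keyword_alt keyword known_segments alphabet
instance (keyword : String) (known_segments : List (String × String × String)) (alphabet : String) (out : Bool) : Decidable (Spec_validate_keyword keyword known_segments alphabet out) := by unfold Spec_validate_keyword; infer_instance

-- ===== CLAIM (what is proved, stated in full; the proofs are below) =====
def Claim_equal_validate_keyword : Prop := ∀ (keyword : String) (known_segments : List (String × String × String)) (alphabet : String), Dom_validate_keyword keyword known_segments alphabet → Spec_validate_keyword keyword known_segments alphabet (validate_keyword keyword known_segments alphabet)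

-- ===== LEMMAS AND PROOFS =====

-- the contents cell (i, j) of A's filled grid ends up holding
def tgtCell (base : List Char) (cols i j : Nat) : List Char :=
  if i * cols + j < base.length then [base.getD (i * cols + j) ' '] else []

def tgtRow (base : List Char) (cols i : Nat) : List (List Char) :=
  (List.range cols).map (tgtCell base cols i)

theorem set_map_range {α : Type} (n c : Nat) (f : Nat → α) (v : α) :
    ((List.range n).map f).set c v = (List.range n).map (fun j => if j = c then v else f j) := by
  apply List.ext_getElem
  · simp
  · intro i h1 h2
    simp only [List.getElem_set, List.getElem_map, List.getElem_range]
    split <;> split <;> first | rfl | omega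

-- A's inner grid-fill loop, one row: fills cells (i, 0) … (i, cols-1) left to right
theorem fill_cells (base : List Char) (cols i : Nat) (blk : List (List (List Char)))
    (hi : i < blk.length) (hrow : blk.getD i [] = List.replicate cols ([] : List Char)) :
    ∀ c, c ≤ cols →
      (List.range c).foldl (gkFillCell base i) (blk, min (i * cols) base.length)
        = (blk.set i ((List.range cols).map (fun j => if j < c then tgtCell base cols i j else [])),
           min (i * cols + c) base.length) := by
  intro c hc
  induction c with
  | zero =>
    simp only [List.range_zero, List.foldl_nil, Nat.add_zero]
    congr 1
    have h1 : ((List.range cols).map fun j => if j < 0 then tgtCell base cols i j else [])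
        = List.replicate cols ([] : List Char) := by
      simp [List.map_const']
    rw [h1, ← hrow, List.getD_eq_getElem blk [] hi, List.set_getElem_self]
  | succ c ihc =>
    have hc' : c ≤ cols := Nat.le_of_succ_le hc
    rw [List.range_succ, List.foldl_append, ihc hc', List.foldl_cons, List.foldl_nil]
    have hgd : ((blk.set i ((List.range cols).map
          (fun j => if j < c then tgtCell base cols i j else []))).getD i [])
        = (List.range cols).map (fun j => if j < c then tgtCell base cols i j else []) := by
      rw [List.getD_eq_getElem _ [] (by simpa using hi), List.getElem_set_self]
    by_cases hidx : i * cols + c < base.length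
    · have hmin : min (i * cols + c) base.length = i * cols + c := by omega
      unfold gkFillCell
      simp only [hmin, hgd, if_pos hidx, List.set_set, set_map_range]
      simp only [Prod.mk.injEq]
      constructor
      · congr 1
        apply List.map_congr_left
        intro j _
        by_cases hj : j = c
        · subst hj
          simp [tgtCell, hidx]
        · simp only [if_neg hj]
          split_ifs <;> first | rfl | omega
      · omega
    · have hmin : min (i * cols + c) base.length = base.length := by omega
      unfold gkFillCell
      simp only [hmin, lt_irrefl, if_false, Prod.mk.injEq]
      constructor
      · congr 1
        apply List.map_congr_left
        intro j _
        by_cases hj : j = c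
        · subst hj
          have ht : tgtCell base cols i j = [] := by simp [tgtCell, hidx]
          simp [ht]
        · split_ifs <;> first | rfl | omega
      · omega

-- A's outer grid-fill loop: the first r rows are filled
theorem fill_rows (base : List Char) (cols rows : Nat) :
    ∀ r, r ≤ rows →
      (List.range r).foldl (gkFillRow base cols)
          (List.replicate rows (List.replicate cols []), 0)
        = ((List.range rows).map
             (fun i => if i < r then tgtRow base cols i else List.replicate cols []),
           min (r * cols) base.length) := by
  intro r hr
  induction r with
  | zero =>
    simp [List.map_const']
  | succ r ih =>
    have hr' : r ≤ rows := Nat.le_of_succ_le hr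
    rw [List.range_succ, List.foldl_append, ih hr', List.foldl_cons, List.foldl_nil]
    show gkFillRow base cols _ r = _
    unfold gkFillRow
    have hi : r < ((List.range rows).map
        (fun i => if i < r then tgtRow base cols i else List.replicate cols [])).length := by
      simpa using hr
    have hrow : ((List.range rows).map
        (fun i => if i < r then tgtRow base cols i else List.replicate cols [])).getD r []
        = List.replicate cols ([] : List Char) := by
      rw [List.getD_eq_getElem _ [] hi]
      simp
    rw [fill_cells base cols r _ hi hrow cols (le_refl cols)]
    simp only [Prod.mk.injEq]
    constructor
    · rw [set_map_range]
      apply List.map_congr_left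
      intro i hmem
      by_cases hir : i = r
      · subst hir
        have : ((List.range cols).map (fun j => if j < cols then tgtCell base cols i j else []))
            = tgtRow base cols i := by
          apply List.map_congr_left
          intro j hj
          rw [if_pos (List.mem_range.1 hj)]
        simp [this]
      · split_ifs <;> first | rfl | omega
    · rw [Nat.succ_mul]

-- every column index produced by the sort is a Nat below len(kw)
theorem gkOrder_mem (kw : List Char) (col : Int) (h : col ∈ gkOrder kw) :
    ∃ c : Nat, col = (c : Int) ∧ c < kw.length := by
  rcases List.mem_map.1 h with ⟨q, hq, rfl⟩
  have h2 := (PySem.List.sorted2_perm _ _ _ _).mem_iff.1 hq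
  rcases List.mem_map.1 h2 with ⟨p, hp, rfl⟩
  rcases (PySem.List.mem_enumerate_iff kw 0 p).1 hp with ⟨k, hk, rfl⟩
  exact ⟨k, by simp, hk⟩

-- A's guarded read of grid column c equals the strided sequence of base
theorem colA_eq (base : List Char) (cols c : Nat) (hc : c < cols)
    (block : List (List (List Char)))
    (hb : block = ((List.range ((base.length + cols - 1) / cols)).foldl (gkFillRow base cols)
        (List.replicate ((base.length + cols - 1) / cols) (List.replicate cols []), 0)).1) :
    (List.range ((base.length + cols - 1) / cols)).flatMap (fun row =>
       if row < block.length ∧ ((c : Int)) < ((block.getD row []).length : Int) ∧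
           PySem.List.pyGetD (block.getD row []) (c : Int) [] ≠ [] then
         PySem.List.pyGetD (block.getD row []) (c : Int) []
       else [])
    = (List.range ((base.length + cols - 1) / cols)).flatMap
        (fun row => (base[c + cols * row]?).toList) := by
  have hblock : block = (List.range ((base.length + cols - 1) / cols)).map
      (fun i => tgtRow base cols i) := by
    rw [hb, fill_rows base cols _ _ (le_refl _)]
    apply List.map_congr_left
    intro i hi
    rw [if_pos (List.mem_range.1 hi)]
  apply List.flatMap_congr
  intro row hrowmem
  have hrlt : row < (base.length + cols - 1) / cols := List.mem_range.1 hrowmem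
  have hlenb : block.length = (base.length + cols - 1) / cols := by rw [hblock]; simp
  have hget : block.getD row [] = tgtRow base cols row := by
    rw [hblock, List.getD_eq_getElem _ [] (by simpa using hrlt), List.getElem_map,
      List.getElem_range]
  have hlenrow : (tgtRow base cols row).length = cols := by simp [tgtRow]
  have hgetD : PySem.List.pyGetD (tgtRow base cols row) (c : Int) [] = tgtCell base cols row c := by
    rw [PySem.List.pyGetD_natCast, tgtRow, List.getD_eq_getElem _ [] (by simpa using hc),
      List.getElem_map, List.getElem_range]
  rw [hget, hgetD]
  by_cases hfill : row * cols + c < base.length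
  · have ht : tgtCell base cols row c = [base.getD (row * cols + c) ' '] := if_pos hfill
    rw [if_pos ⟨by omega, by rw [hlenrow]; exact_mod_cast hc, by rw [ht]; simp⟩, ht]
    have hidx : c + cols * row = row * cols + c := by ring
    rw [hidx, List.getElem?_eq_getElem hfill]
    rw [List.getD_eq_getElem base ' ' hfill]
    rfl
  · have ht : tgtCell base cols row c = [] := if_neg hfill
    rw [if_neg (by rw [ht]; intro hcontra; exact hcontra.2.2 rfl)]
    have hidx : c + cols * row = row * cols + c := by ring
    rw [hidx, List.getElem?_eq_none (by omega)]
    rfl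

-- B's stride-cols slice of base equals the same strided sequence
theorem colB_eq (base : List Char) (cols c : Nat) (hc : c < cols) (hlen : cols ≤ base.length) :
    (PySem.List.slice? base (some (c : Int)) none (cols : Int)).getD []
    = (List.range ((base.length + cols - 1) / cols)).flatMap
        (fun row => (base[c + cols * row]?).toList) := by
  have hcols : 0 < cols := lt_of_le_of_lt (Nat.zero_le c) hc
  have hclen : c < base.length := lt_of_lt_of_le hc hlen
  have hlen0 : 0 < base.length := lt_of_lt_of_le hcols hlen
  have h1 : ¬((cols : Int) = 0) := by exact_mod_cast Nat.pos_iff_ne_zero.1 hcols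
  have h2 : ¬((cols : Int) < 0) := by omega
  have h3 : ¬((c : Int) < 0) := by omega
  have h4 : min (c : Int) (base.length : Int) = (c : Int) := by omega
  have h5 : (0:Int) < (cols : Int) := by omega
  have h6 : (c : Int) < (base.length : Int) := by omega
  rw [PySem.List.slice?, PySem.List.sliceIndices]
  simp only [if_neg h1, if_neg h2, if_neg h3, h4, if_pos h5, if_pos h6, Option.getD_some]
  have hidx : ∀ k : Nat, ((c:Int) + (cols:Int)*(k:Int)).toNat = c + cols*k := fun k => by omega
  have e : (↑base.length - ↑c + ↑cols - 1 : Int) = ((base.length - c + cols - 1 : Nat) : Int) := by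
    omega
  have hcnt : ((↑base.length - ↑c + ↑cols - 1 : Int) / ↑cols).toNat
      = (base.length - c + cols - 1) / cols := by
    rw [e, ← Int.natCast_ediv]
    exact Int.toNat_natCast _
  have hkiff : ∀ k : Nat, k < (base.length - c + cols - 1) / cols ↔ c + cols*k < base.length := by
    intro k
    rw [Nat.lt_iff_add_one_le, Nat.le_div_iff_mul_le hcols, Nat.add_mul, one_mul,
      Nat.mul_comm k cols]
    omega
  have hriff : ∀ k : Nat, k < (base.length + cols - 1) / cols ↔ cols*k < base.length := by
    intro k
    rw [Nat.lt_iff_add_one_le, Nat.le_div_iff_mul_le hcols, Nat.add_mul, one_mul,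
      Nat.mul_comm k cols]
    omega
  have hcr : (base.length - c + cols - 1) / cols ≤ (base.length + cols - 1) / cols := by
    by_contra h
    have h7 := (hkiff ((base.length + cols - 1) / cols)).1 (by omega)
    have h8 := (hriff ((base.length + cols - 1) / cols)).2 (by omega)
    omega
  rw [hcnt, List.filterMap_eq_flatMap_toList]
  simp only [hidx]
  rw [show (base.length + cols - 1) / cols
      = (base.length - c + cols - 1) / cols
        + ((base.length + cols - 1) / cols - (base.length - c + cols - 1) / cols) from by omega,
    List.range_add, List.flatMap_append]
  have htail : List.flatMap (fun row => base[c + cols * row]?.toList)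
      (List.map (fun x => (base.length - c + cols - 1) / cols + x)
        (List.range ((base.length + cols - 1) / cols - (base.length - c + cols - 1) / cols)))
      = [] := by
    rw [List.flatMap_eq_nil_iff]
    intro a ha
    rcases List.mem_map.1 ha with ⟨x, _, rfl⟩
    have h9 : ¬ (c + cols * ((base.length - c + cols - 1) / cols + x) < base.length) := by
      intro hcon
      have := (hkiff _).2 hcon
      omega
    rw [List.getElem?_eq_none (by omega)]
    rfl
  rw [htail, List.append_nil]

theorem create_eq (keyword alphabet : List Char) :
    create_keyed_alphabet_py keyword alphabet = create_keyed_alphabet_alt_py keyword alphabet := by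
  unfold create_keyed_alphabet_py create_keyed_alphabet_alt_py
  by_cases h0 : (gkKeyword keyword).length = 0
  · simp [h0]
  · simp only [if_neg h0]
    apply List.flatMap_congr
    intro col hcol
    rcases gkOrder_mem (gkKeyword keyword) col hcol with ⟨c, rfl, hc⟩
    have hlen : (gkKeyword keyword).length ≤ (gkBase (gkKeyword keyword) alphabet).length := by
      simp [gkBase]
    rw [colA_eq (gkBase (gkKeyword keyword) alphabet) (gkKeyword keyword).length c hc _ rfl,
      colB_eq (gkBase (gkKeyword keyword) alphabet) (gkKeyword keyword).length c hc hlen]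

theorem inner_cases (mixed alph : List Char) (pairs : List (Char × Char)) :
    (vkInnerA mixed alph pairs = some none
        ∧ pairs.all (fun cp => vkOk mixed alph (alph.length : Int) cp.1 cp.2) = true)
    ∨ ((vkInnerA mixed alph pairs = none ∨ vkInnerA mixed alph pairs = some (some false))
        ∧ pairs.all (fun cp => vkOk mixed alph (alph.length : Int) cp.1 cp.2) = false) := by
  induction pairs with
  | nil => exact Or.inl ⟨rfl, rfl⟩
  | cons cp rest ih =>
    obtain ⟨c, p⟩ := cp
    have hfind := PySem.Chars.neg_one_le_find mixed [c]
    by_cases h1 : PySem.Chars.find mixed [c] = -1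
    · exact Or.inr ⟨Or.inr (by simp [vkInnerA, h1]), by simp [vkOk, h1]⟩
    · by_cases h2 : (alph.length : Int) ≤ PySem.Chars.find mixed [c]
      · have hnone : PySem.List.pyGet? alph (PySem.Chars.find mixed [c]) = none := by
          rw [PySem.List.pyGet?_eq_none_iff]
          intro hr; exact absurd hr.2 (by omega)
        exact Or.inr ⟨Or.inl (by simp [vkInnerA, h1, hnone]), by simp [vkOk, h1, h2]⟩
      · have h0 : 0 ≤ PySem.Chars.find mixed [c] := by omega
        have hlt : PySem.Chars.find mixed [c] < (alph.length : Int) := by omega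
        have hsome := PySem.List.pyGet?_eq_some_getElem alph h0 hlt
        have hgetD := PySem.List.pyGetD_eq_getElem alph ' ' h0 hlt
        by_cases h3 : PySem.Int.mod
            (PySem.Chars.find alph [alph[(PySem.Chars.find mixed [c]).toNat]]
              - PySem.Chars.find alph [PySem.Chars.upperChar p]) (alph.length : Int) > 9
        · refine Or.inr ⟨Or.inr ?_, ?_⟩
          · simp [vkInnerA, h1, hsome, h3]
          · simp [vkOk, h1, h2, hgetD]; omega
        · have hok : vkOk mixed alph (alph.length : Int) c p = true := by
            simp [vkOk, h1, h2, hgetD]; omega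
          have hstep : vkInnerA mixed alph ((c, p) :: rest) = vkInnerA mixed alph rest := by
            simp [vkInnerA, h1, hsome, h3]
          rcases ih with ⟨ha, hb⟩ | ⟨ha, hb⟩
          · exact Or.inl ⟨by rw [hstep, ha], by simp [hok, hb]⟩
          · exact Or.inr ⟨by rw [hstep]; exact ha, by simp [hok, hb]⟩

theorem outer_eq (mixed alph : List Char) (segs : List (String × String × String)) :
    (match vkOuterA mixed alph segs with
     | none => false
     | some b => b)
    = (segs.flatMap (fun t => t.2.1.toList.zip t.2.2.toList)).all
        (fun cp => vkOk mixed alph (alph.length : Int) cp.1 cp.2) := by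
  induction segs with
  | nil => rfl
  | cons t rest ih =>
    obtain ⟨x, cs, ps⟩ := t
    rcases inner_cases mixed alph (cs.toList.zip ps.toList) with ⟨ha, hb⟩ | ⟨ha, hb⟩
    · simp only [vkOuterA, ha, List.flatMap_cons, List.all_append, hb, Bool.true_and]
      exact ih
    · rcases ha with ha | ha <;>
        simp only [vkOuterA, ha, List.flatMap_cons, List.all_append, hb, Bool.false_and]

-- ===== VERDICT (by name: the statement is the Claim_ definition above) =====
theorem validate_keyword_spec : Claim_equal_validate_keyword := by
  intro keyword known_segments alphabet _
  unfold Spec_validate_keyword validate_keyword validate_keyword_alt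
  rw [← create_eq]
  exact outer_eq _ _ known_segments
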